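-- pv_equiv track=rewrite | github.com/LinaC404/silly-guy-try-Leetcode | Daily attendance/2016. Maximum Difference Between Increasing Elements.py | mymaximumDifference
-- ===== SOURCE A (Python) =====
-- def mymaximumDifference(nums):
--     """
--     :type nums: List[int]
--     :rtype: int
--     Runtime: 37 ms, faster than 66.94% of Python online submissions for Maximum Difference Between Increasing Elements.
--     Memory Usage: 13.6 MB, less than 47.52% of Python online submissions for Maximum Difference Between Increasing Elements.
--     """
--     res = -1
--     stack = []
--     stack.append(nums[0])
--     for i in range(1,len(nums)):
--         if nums[i]>stack[-1]:
--             stack.append(nums[i])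
--         else:
--             while stack and stack[-1]>=nums[i]:
--                 stack.pop()
--             stack.append(nums[i])
--         if len(stack)>=2: res = max(stack[-1]-stack[0],res)
--     return res
-- ===== SOURCE B (Python) =====
-- def mymaximumDifference(nums):
--     res = -1
--     min_val = nums[0]
--     for x in nums[1:]:
--         if x > min_val:
--             res = max(res, x - min_val)
--         else:
--             min_val = x
--     return res
-- ===== Notes on version B (the rewrite author's own statement) =====
-- stated objective: simpler
-- what changed: Replaced the monotonic stack with its inner pop loop by a single running-minimum scalar updated in one pass.
import Mathlib
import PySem

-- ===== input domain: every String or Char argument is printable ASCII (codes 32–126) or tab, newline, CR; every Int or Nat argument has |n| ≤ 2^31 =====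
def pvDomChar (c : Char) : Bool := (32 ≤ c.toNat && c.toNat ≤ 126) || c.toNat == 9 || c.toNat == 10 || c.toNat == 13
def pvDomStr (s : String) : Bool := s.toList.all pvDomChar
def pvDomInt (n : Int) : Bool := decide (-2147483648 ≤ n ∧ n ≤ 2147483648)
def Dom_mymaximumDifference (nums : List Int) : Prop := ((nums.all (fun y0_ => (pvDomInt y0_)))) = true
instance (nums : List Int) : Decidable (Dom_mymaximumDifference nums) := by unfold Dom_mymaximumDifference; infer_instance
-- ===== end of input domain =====

-- B replaces A's monotonic stack (with its inner pop loop) by a single running-minimum scalar: simpler one-pass scan, same return value.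


-- ===== PORT A =====
-- the stack is stored TOP-FIRST (head = Python stack[-1], getLast = Python stack[0])
-- 'while stack and stack[-1] >= x: stack.pop()'
def pvPopGE (x : Int) : List Int → List Int
  | [] => []
  | t :: rest => if t ≥ x then pvPopGE x rest else t :: rest

-- one iteration of A's for-loop over state (res, stack)
def pvAStep (st : Int × List Int) (x : Int) : Int × List Int :=
  let res := st.1
  let stack := st.2
  let stack' := if x > stack.headD 0 then x :: stack else x :: pvPopGE x stack
  let res' := if stack'.length ≥ 2 then max (stack'.headD 0 - stack'.getLastD 0) res else res
  (res', stack')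

def mymaximumDifference (nums : List Int) : Int :=
  match nums with
  | [] => -1  -- Python raises IndexError on nums[0]; excluded by Pre_
  | h :: t => (t.foldl pvAStep (-1, [h])).1

-- ===== PORT B =====
-- one iteration of B's loop over state (res, min_val)
def pvBStep (st : Int × Int) (x : Int) : Int × Int :=
  if x > st.2 then (max st.1 (x - st.2), st.2) else (st.1, x)

def mymaximumDifference_alt (nums : List Int) : Int :=
  match nums with
  | [] => -1  -- Python raises IndexError on nums[0]; excluded by Pre_
  | h :: t => (t.foldl pvBStep (-1, h)).1

-- ===== PRECONDITION & SPEC =====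
-- Python A raises IndexError on the empty list (nums[0]); that is the only exclusion.
def Pre_mymaximumDifference (nums : List Int) : Prop := nums ≠ []
instance (nums : List Int) : Decidable (Pre_mymaximumDifference nums) := by unfold Pre_mymaximumDifference; infer_instance
def pvWitness_mymaximumDifference : List Int := [1, 5, 2]

def Spec_mymaximumDifference (nums : List Int) (out : Int) : Prop := out = mymaximumDifference_alt nums
instance (nums : List Int) (out : Int) : Decidable (Spec_mymaximumDifference nums out) := by unfold Spec_mymaximumDifference; infer_instance

-- ===== CLAIM (what is proved, stated in full; the proofs are below) =====
def Claim_equal_mymaximumDifference : Prop := ∀ (nums : List Int), Dom_mymaximumDifference nums → Pre_mymaximumDifference nums → Spec_mymaximumDifference nums (mymaximumDifference nums)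

-- ===== LEMMAS AND PROOFS =====

lemma pvPopGE_mem {x y : Int} {l : List Int} (h : y ∈ pvPopGE x l) : y ∈ l := by
  induction l with
  | nil => exact absurd h (by simp [pvPopGE])
  | cons a t ih =>
    simp only [pvPopGE] at h
    split at h
    · exact List.mem_cons_of_mem _ (ih h)
    · exact h

lemma pvPopGE_nil {x : Int} {l : List Int} (h : ∀ y ∈ l, x ≤ y) : pvPopGE x l = [] := by
  induction l with
  | nil => rfl
  | cons a t ih =>
    simp only [pvPopGE, if_pos (h a (List.mem_cons_self ..))]
    exact ih (fun y hy => h y (List.mem_cons_of_mem _ hy))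

lemma pvPopGE_last {x mn : Int} {l : List Int} (hx : mn < x) (h : l.getLast? = some mn) :
    (pvPopGE x l).getLast? = some mn := by
  induction l with
  | nil => simp at h
  | cons a t ih =>
    cases t with
    | nil =>
      simp only [List.getLast?_singleton, Option.some.injEq] at h
      subst h
      simp [pvPopGE, not_le.mpr hx]
    | cons b u =>
      rw [List.getLast?_cons_cons] at h
      simp only [pvPopGE]
      split
      · exact ih h
      · rw [List.getLast?_cons_cons]; exact h

lemma pvPopGE_ne_nil {x mn : Int} {l : List Int} (hx : mn < x) (h : l.getLast? = some mn) :
    pvPopGE x l ≠ [] := by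
  intro hnil
  have := pvPopGE_last hx h
  rw [hnil] at this
  simp at this

-- one step preserves: equal res, stack's bottom = min_val, all stack elements ≥ min_val
lemma pv_step (res mn x : Int) (stack : List Int)
    (hlast : stack.getLast? = some mn) (hall : ∀ y ∈ stack, mn ≤ y) :
    (pvAStep (res, stack) x).1 = (pvBStep (res, mn) x).1 ∧
    (pvAStep (res, stack) x).2.getLast? = some (pvBStep (res, mn) x).2 ∧
    (∀ y ∈ (pvAStep (res, stack) x).2, (pvBStep (res, mn) x).2 ≤ y) := by
  obtain ⟨h0, s, rfl⟩ : ∃ h0 s, stack = h0 :: s := by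
    cases stack with
    | nil => simp at hlast
    | cons a t => exact ⟨a, t, rfl⟩
  have hh0 : mn ≤ h0 := hall h0 (List.mem_cons_self ..)
  by_cases hx : x > mn
  · -- x > min_val: both update res with x - mn
    have hpop : pvPopGE x (h0 :: s) ≠ [] := pvPopGE_ne_nil hx hlast
    have hstack' : (pvAStep (res, h0 :: s) x).2 = x :: pvPopGE x (h0 :: s) := by
      simp only [pvAStep]
      split
      · next hgt =>
        have hgt' : h0 < x := by simpa using hgt
        have : pvPopGE x (h0 :: s) = h0 :: s := by
          unfold pvPopGE
          rw [if_neg (not_le.mpr hgt')]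
        rw [this]
      · rfl
    obtain ⟨b, u, hbu⟩ : ∃ b u, pvPopGE x (h0 :: s) = b :: u := by
      cases hpe : pvPopGE x (h0 :: s) with
      | nil => exact absurd hpe hpop
      | cons b u => exact ⟨b, u, rfl⟩
    have hlast' : (x :: pvPopGE x (h0 :: s)).getLast? = some mn := by
      rw [hbu, List.getLast?_cons_cons, ← hbu]
      exact pvPopGE_last hx hlast
    have hlen : (x :: pvPopGE x (h0 :: s)).length ≥ 2 := by
      rw [hbu]; simp
    have hres : (pvAStep (res, h0 :: s) x).1 = max (x - mn) res := by
      simp only [pvAStep]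
      have h2 : ((if x > (h0 :: s).headD 0 then x :: (h0 :: s) else x :: pvPopGE x (h0 :: s)) : List Int) = x :: pvPopGE x (h0 :: s) := by
        have := hstack'
        simpa [pvAStep] using this
      rw [h2, if_pos hlen]
      have hget : (x :: pvPopGE x (h0 :: s)).getLastD 0 = mn := by
        rw [List.getLastD_eq_getLast?, hlast']
        rfl
      rw [hget]
      rfl
    refine ⟨?_, ?_, ?_⟩
    · rw [hres]
      simp [pvBStep, if_pos hx, max_comm]
    · rw [hstack']
      simp only [pvBStep, if_pos hx]
      exact hlast'
    · rw [hstack']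
      simp only [pvBStep, if_pos hx]
      intro y hy
      rcases List.mem_cons.mp hy with rfl | hy
      · exact le_of_lt hx
      · exact hall y (pvPopGE_mem hy)
  · -- x ≤ min_val: A's stack collapses to [x], B sets min_val := x
    replace hx : x ≤ mn := not_lt.mp hx
    have hxh0 : ¬ h0 < x := not_lt.mpr (le_trans hx hh0)
    have hpop : pvPopGE x (h0 :: s) = [] :=
      pvPopGE_nil (fun y hy => le_trans hx (hall y hy))
    have hstack' : (pvAStep (res, h0 :: s) x).2 = [x] := by
      simp only [pvAStep, List.headD_cons]
      rw [if_neg hxh0, hpop]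
    have hres : (pvAStep (res, h0 :: s) x).1 = res := by
      simp only [pvAStep, List.headD_cons]
      rw [if_neg hxh0, hpop]
      simp
    refine ⟨?_, ?_, ?_⟩
    · rw [hres]; simp [pvBStep, not_lt.mpr hx]
    · rw [hstack']; simp [pvBStep, not_lt.mpr hx]
    · rw [hstack']; simp [pvBStep, not_lt.mpr hx]


lemma pv_fold (t : List Int) (res mn : Int) (stack : List Int)
    (hlast : stack.getLast? = some mn) (hall : ∀ y ∈ stack, mn ≤ y) :
    (t.foldl pvAStep (res, stack)).1 = (t.foldl pvBStep (res, mn)).1 := by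
  induction t generalizing res mn stack with
  | nil => rfl
  | cons x u ih =>
    obtain ⟨h1, h2, h3⟩ := pv_step res mn x stack hlast hall
    simp only [List.foldl_cons]
    have hb : pvBStep (res, mn) x = ((pvBStep (res, mn) x).1, (pvBStep (res, mn) x).2) := rfl
    have ha : pvAStep (res, stack) x = ((pvAStep (res, stack) x).1, (pvAStep (res, stack) x).2) := rfl
    rw [ha, hb, h1]
    exact ih _ _ _ h2 h3

-- ===== VERDICT (by name: the statement is the Claim_ definition above) =====
theorem mymaximumDifference_spec : Claim_equal_mymaximumDifference := by
  intro nums _ hpre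
  cases nums with
  | nil => exact absurd rfl hpre
  | cons h t =>
    show _ = _
    simp only [mymaximumDifference, mymaximumDifference_alt]
    exact pv_fold t (-1) h [h] (by simp) (by simp)
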